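-- pv_equiv track=rewrite | github.com/Golto/golpex_prototype | Metavers2p_1_4/primes.py | Rlist
-- ===== SOURCE A (Python) =====
-- def gcd(a, b):
--     while b != 0:
--         r = a % b
--         a, b = b, r
--     return a
--
-- def Rlist(N):
-- 	Rs = [0,7]
-- 	GCDs = []
-- 	for n in range(2,N):
-- 		Rgcd = gcd(n, Rs[n - 1])
--
-- 		Rs.append(Rs[n - 1] + Rgcd)
-- 		if Rgcd != 1:
-- 			GCDs.append([n, Rgcd])
--
-- 	return Rs, GCDs
-- ===== SOURCE B (Python) =====
-- def gcd(a, b):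
--     while b != 0:
--         r = a % b
--         a, b = b, r
--     return a
--
-- def Rlist(N):
--     # pass 1: build the complete Rowland sequence, always extending from the last element
--     Rs = [0, 7]
--     for n in range(2, N):
--         last = Rs[-1]
--         Rs.append(last + gcd(n, last))
--     # pass 2: extract the nontrivial increments as consecutive differences
--     GCDs = [[n, Rs[n] - Rs[n - 1]] for n in range(2, N) if Rs[n] - Rs[n - 1] != 1]
--     return Rs, GCDs
-- ===== Notes on version B (the rewrite author's own statement) =====
-- stated objective: alternative
-- what changed: B separates sequence construction from feature extraction: one pass builds the Rowland sequence by appending to the last element, then a second pass derives each gcd as the consecutive difference Rs[n]-Rs[n-1], instead of A's single interleaved loop that recomputes Rs[n-1] by index and records the gcd inline.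
import Mathlib
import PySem

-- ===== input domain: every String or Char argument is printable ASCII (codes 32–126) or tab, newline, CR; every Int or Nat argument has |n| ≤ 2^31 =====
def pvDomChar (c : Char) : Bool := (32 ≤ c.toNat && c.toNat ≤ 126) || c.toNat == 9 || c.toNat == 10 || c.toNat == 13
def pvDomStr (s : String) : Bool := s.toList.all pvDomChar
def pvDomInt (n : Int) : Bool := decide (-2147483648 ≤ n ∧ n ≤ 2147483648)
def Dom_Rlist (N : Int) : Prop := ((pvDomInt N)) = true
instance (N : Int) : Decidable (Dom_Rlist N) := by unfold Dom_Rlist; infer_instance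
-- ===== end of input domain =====

-- B separates sequence construction from feature extraction: one pass builds the Rowland
-- sequence by extending the last element, a second pass reads each gcd off as the
-- consecutive difference Rs[n]-Rs[n-1]; A interleaves both in one loop. (objective: alternative)

-- ===== PORT A =====
-- Euclid gcd, shared helper of both Pythons (while b != 0: a, b = b, a % b; Python '%')
def pygcd (a b : Int) : Int :=
  if h : b = 0 then a else pygcd b (PySem.Int.mod a b)
termination_by b.natAbs
decreasing_by
  rcases lt_trichotomy b 0 with hb | hb | hb
  · have := PySem.Int.mod_neg_bounds a (b := b) hb; omega
  · exact absurd hb h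
  · have h1 := PySem.Int.mod_nonneg a (b := b) hb
    have h2 := PySem.Int.mod_lt a (b := b) hb
    omega

-- loop body of A; index n-1 is always in range because |Rs| = n at step n
def stepA (st : List Int × List (List Int)) (n : Int) : List Int × List (List Int) :=
  let Rgcd := pygcd n (PySem.List.pyGetD st.1 (n - 1) 0)
  (st.1 ++ [PySem.List.pyGetD st.1 (n - 1) 0 + Rgcd],
   if Rgcd ≠ 1 then st.2 ++ [[n, Rgcd]] else st.2)

def Rlist (N : Int) : List Int × List (List Int) :=
  (PySem.List.pyRange 2 N 1).foldl stepA ([0, 7], [])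

-- ===== PORT B =====
-- pass 1 loop body: extend from the last element Rs[-1]
def stepB (Rs : List Int) (n : Int) : List Int :=
  let last := PySem.List.pyGetD Rs (-1) 0
  Rs ++ [last + pygcd n last]

def altRs (N : Int) : List Int :=
  (PySem.List.pyRange 2 N 1).foldl stepB [0, 7]

-- consecutive difference Rs[n] - Rs[n-1]
def altDiff (Rs : List Int) (n : Int) : Int :=
  PySem.List.pyGetD Rs n 0 - PySem.List.pyGetD Rs (n - 1) 0

def Rlist_alt (N : Int) : List Int × List (List Int) :=
  let Rs := altRs N
  (Rs, (PySem.List.pyRange 2 N 1).filterMap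
        (fun n => if altDiff Rs n ≠ 1 then some [n, altDiff Rs n] else none))

-- ===== PRECONDITION & SPEC =====
def Spec_Rlist (N : Int) (out : List Int × List (List Int)) : Prop := out = Rlist_alt N
instance (N : Int) (out : List Int × List (List Int)) : Decidable (Spec_Rlist N out) := by unfold Spec_Rlist; infer_instance

-- ===== CLAIM (what is proved, stated in full; the proofs are below) =====
def Claim_equal_Rlist : Prop := ∀ (N : Int), Dom_Rlist N → Spec_Rlist N (Rlist N)

-- ===== LEMMAS AND PROOFS =====

-- one unrolling of B's first pass
theorem altRs_succ (m : Int) (hm : 2 ≤ m) : altRs (m + 1) = stepB (altRs m) m := by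
  unfold altRs
  rw [PySem.List.pyRange_one_succ_right hm, List.foldl_append]
  rfl

theorem altRs_length (m : Int) (hm : 2 ≤ m) : ((altRs m).length : Int) = m := by
  induction m, hm using Int.le_induction with
  | base => simp [altRs, PySem.List.pyRange_one_eq_nil]
  | succ m hm ih =>
      rw [altRs_succ m hm]
      simp [stepB]; omega

theorem pyGetD_append_singleton (xs : List Int) (x : Int) (n : Int)
    (h0 : 0 ≤ n) (h1 : n < xs.length) :
    PySem.List.pyGetD (xs ++ [x]) n 0 = PySem.List.pyGetD xs n 0 := by
  rw [PySem.List.pyGetD_eq_getElem (xs ++ [x]) 0 h0 (by simp; omega),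
      PySem.List.pyGetD_eq_getElem xs 0 h0 h1]
  exact List.getElem_append_left (by omega)

-- prefix stability: entries below index m never change after step m
theorem altRs_stable (m M n : Int) (hm : 2 ≤ m) (hM : m ≤ M) (h0 : 0 ≤ n) (hn : n < m) :
    PySem.List.pyGetD (altRs M) n 0 = PySem.List.pyGetD (altRs m) n 0 := by
  induction M, hM using Int.le_induction with
  | base => rfl
  | succ M hM ih =>
      rw [altRs_succ M (by omega)]
      show PySem.List.pyGetD (altRs M ++ [_]) n 0 = _
      rw [pyGetD_append_singleton (altRs M) _ n h0
        (by have := altRs_length M (by omega); omega), ih]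

theorem pyGetD_last (xs : List Int) (h : xs ≠ []) :
    PySem.List.pyGetD xs ((xs.length : Int) - 1) 0 = PySem.List.pyGetD xs (-1) 0 := by
  rw [PySem.List.pyGetD_neg_one xs 0 h,
      PySem.List.pyGetD_eq_getElem xs 0
        (by have := List.length_pos_iff.mpr h; omega) (by omega)]
  rw [List.getLast_eq_getElem]
  congr 1
  omega

theorem pyGetD_concat_length (xs : List Int) (x : Int) :
    PySem.List.pyGetD (xs ++ [x]) (xs.length : Int) 0 = x := by
  rw [PySem.List.pyGetD_eq_getElem (xs ++ [x]) 0 (by positivity) (by simp)]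
  simp

-- the new diff at step m is exactly the gcd increment
theorem altDiff_top (m : Int) (hm : 2 ≤ m) :
    altDiff (altRs (m + 1)) m = pygcd m (PySem.List.pyGetD (altRs m) (-1) 0) := by
  have hlen := altRs_length m hm
  have hpos : altRs m ≠ [] := by
    intro h; rw [h] at hlen; simp at hlen; omega
  rw [altDiff, altRs_succ m hm, stepB]
  have h1 : PySem.List.pyGetD (altRs m ++ [PySem.List.pyGetD (altRs m) (-1) 0 +
      pygcd m (PySem.List.pyGetD (altRs m) (-1) 0)]) m 0
      = PySem.List.pyGetD (altRs m) (-1) 0 + pygcd m (PySem.List.pyGetD (altRs m) (-1) 0) := by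
    have := pyGetD_concat_length (altRs m)
      (PySem.List.pyGetD (altRs m) (-1) 0 + pygcd m (PySem.List.pyGetD (altRs m) (-1) 0))
    rwa [hlen] at this
  have h2 : PySem.List.pyGetD (altRs m ++ [PySem.List.pyGetD (altRs m) (-1) 0 +
      pygcd m (PySem.List.pyGetD (altRs m) (-1) 0)]) (m - 1) 0
      = PySem.List.pyGetD (altRs m) (-1) 0 := by
    rw [pyGetD_append_singleton (altRs m) _ (m - 1) (by omega) (by omega)]
    have := pyGetD_last (altRs m) hpos
    rwa [hlen] at this
  rw [h1, h2]; ring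

-- A's diff below the top is unchanged by the new append
theorem altDiff_stable (m n : Int) (hm : 2 ≤ m) (h2 : 2 ≤ n) (hn : n < m) :
    altDiff (altRs (m + 1)) n = altDiff (altRs m) n := by
  unfold altDiff
  rw [altRs_stable m (m + 1) n hm (by omega) (by omega) hn,
      altRs_stable m (m + 1) (n - 1) hm (by omega) (by omega) (by omega)]

-- the main invariant: A's fold equals B's two passes, for every m ≥ 2
theorem main_inv (m : Int) (hm : 2 ≤ m) : Rlist m = Rlist_alt m := by
  induction m, hm using Int.le_induction with
  | base =>
      simp [Rlist, Rlist_alt, altRs, PySem.List.pyRange_one_eq_nil]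
  | succ m hm ih =>
      have hlen := altRs_length m hm
      have hpos : altRs m ≠ [] := by
        intro h; rw [h] at hlen; simp at hlen; omega
      have hrange : PySem.List.pyRange 2 (m + 1) 1 = PySem.List.pyRange 2 m 1 ++ [m] :=
        PySem.List.pyRange_one_succ_right hm
      -- unroll A's fold one step
      have hA : Rlist (m + 1) = stepA (Rlist m) m := by
        unfold Rlist; rw [hrange, List.foldl_append]; rfl
      rw [hA, ih]
      -- evaluate stepA on B's value
      show stepA (altRs m, (PySem.List.pyRange 2 m 1).filterMap
        (fun n => if altDiff (altRs m) n ≠ 1 then some [n, altDiff (altRs m) n] else none)) m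
        = Rlist_alt (m + 1)
      have hidx : PySem.List.pyGetD (altRs m) (m - 1) 0 = PySem.List.pyGetD (altRs m) (-1) 0 := by
        have := pyGetD_last (altRs m) hpos; rwa [hlen] at this
      have hfm : (PySem.List.pyRange 2 (m + 1) 1).filterMap
          (fun n => if altDiff (altRs (m + 1)) n ≠ 1 then some [n, altDiff (altRs (m + 1)) n] else none)
          = (PySem.List.pyRange 2 m 1).filterMap
              (fun n => if altDiff (altRs m) n ≠ 1 then some [n, altDiff (altRs m) n] else none)
            ++ (if altDiff (altRs (m + 1)) m ≠ 1 then [[m, altDiff (altRs (m + 1)) m]] else []) := by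
        rw [hrange, List.filterMap_append]
        congr 1
        · apply List.filterMap_congr
          intro n hn
          rw [PySem.List.mem_pyRange_one] at hn
          rw [altDiff_stable m n hm hn.1 hn.2]
        · simp only [List.filterMap_cons, List.filterMap_nil]
          by_cases hd : altDiff (altRs (m + 1)) m = 1 <;> simp [hd]
      rw [Rlist_alt]
      refine Prod.ext ?_ ?_
      · show altRs m ++ [PySem.List.pyGetD (altRs m) (m - 1) 0 +
            pygcd m (PySem.List.pyGetD (altRs m) (m - 1) 0)] = altRs (m + 1)
        rw [altRs_succ m hm, stepB, hidx]
      · show (if pygcd m (PySem.List.pyGetD (altRs m) (m - 1) 0) ≠ 1 then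
            (PySem.List.pyRange 2 m 1).filterMap
              (fun n => if altDiff (altRs m) n ≠ 1 then some [n, altDiff (altRs m) n] else none)
            ++ [[m, pygcd m (PySem.List.pyGetD (altRs m) (m - 1) 0)]]
          else (PySem.List.pyRange 2 m 1).filterMap
              (fun n => if altDiff (altRs m) n ≠ 1 then some [n, altDiff (altRs m) n] else none))
          = _
        rw [hfm, hidx, altDiff_top m hm]
        split <;> simp

-- ===== VERDICT (by name: the statement is the Claim_ definition above) =====
theorem Rlist_spec : Claim_equal_Rlist := by
  intro N _
  unfold Spec_Rlist
  by_cases h : 2 ≤ N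
  · exact main_inv N h
  · have : PySem.List.pyRange 2 N 1 = [] :=
      PySem.List.pyRange_one_eq_nil (by omega)
    simp [Rlist, Rlist_alt, altRs, this]
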